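-- pv_equiv track=rewrite | github.com/tannuk2505/PABL-2cse24-2410031602 | 2-HomeWork/52-program.py | footpath
-- ===== SOURCE A (Python) =====
-- def footpath(n, m, a, queries):
--     # Step 1: Create DP arrays
--     topl = [[0]*m for _ in range(n)]
--     topr = [[0]*m for _ in range(n)]
--     bottoml = [[0]*m for _ in range(n)]
--     bottomr = [[0]*m for _ in range(n)]
--
--     # Top-left
--     for i in range(n):
--         for j in range(m):
--             topl[i][j] = a[i][j]
--             if i > 0:
--                 topl[i][j] = min(topl[i][j], topl[i-1][j])
--             if j > 0:
--                 topl[i][j] = min(topl[i][j], topl[i][j-1])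
--
--     # Top-right
--     for i in range(n):
--         for j in range(m-1, -1, -1):
--             topr[i][j] = a[i][j]
--             if i > 0:
--                 topr[i][j] = min(topr[i][j], topr[i-1][j])
--             if j < m-1:
--                 topr[i][j] = min(topr[i][j], topr[i][j+1])
--
--     # Bottom-left
--     for i in range(n-1, -1, -1):
--         for j in range(m):
--             bottoml[i][j] = a[i][j]
--             if i < n-1:
--                 bottoml[i][j] = min(bottoml[i][j], bottoml[i+1][j])
--             if j > 0:
--                 bottoml[i][j] = min(bottoml[i][j], bottoml[i][j-1])
--
--     # Bottom-right
--     for i in range(n-1, -1, -1):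
--         for j in range(m-1, -1, -1):
--             bottomr[i][j] = a[i][j]
--             if i < n-1:
--                 bottomr[i][j] = min(bottomr[i][j], bottomr[i+1][j])
--             if j < m-1:
--                 bottomr[i][j] = min(bottomr[i][j], bottomr[i][j+1])
--
--     # Step 2: Answer queries
--     result = []
--
--     for r, c in queries:
--         r -= 1
--         c -= 1
--
--         tl = topl[r-1][c-1] if r > 0 and c > 0 else 0
--         tr = topr[r-1][c+1] if r > 0 and c < m-1 else 0
--         bl = bottoml[r+1][c-1] if r < n-1 and c > 0 else 0
--         br = bottomr[r+1][c+1] if r < n-1 and c < m-1 else 0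
--
--         result.append(tl + tr + bl + br)
--
--     return result
-- ===== SOURCE B (Python) =====
-- def footpath(n, m, a, queries):
--     # Per-query direct rectangle minima instead of four DP tables.
--     def rmin(i0, i1, j0, j1):
--         return min(a[i][j] for i in range(i0, i1) for j in range(j0, j1))
--     result = []
--     for r, c in queries:
--         r -= 1
--         c -= 1
--         tl = rmin(0, r, 0, c) if r > 0 and c > 0 else 0
--         tr = rmin(0, r, c + 1, m) if r > 0 and c < m - 1 else 0
--         bl = rmin(r + 1, n, 0, c) if r < n - 1 and c > 0 else 0
--         br = rmin(r + 1, n, c + 1, m) if r < n - 1 and c < m - 1 else 0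
--         result.append(tl + tr + bl + br)
--     return result
-- ===== Notes on version B (the rewrite author's own statement) =====
-- stated objective: alternative
-- what changed: Replaced the four precomputed corner DP tables with a per-query direct minimum scan over each of the four inclusive corner rectangles; Pre_ excludes inputs where A's subscripts go out of range, on which A raises IndexError or returns an accidental negative-index-wraparound value.
-- outside the precondition, e.g. on footpath(2, 2, [[1, 2], [3, 4]], [(-1, 1)]): A returns [4], B returns [2]; on footpath(1, 2, [[-4, -6, 2], [-5, -5, 5, 7], [-7]], [(-1, -1)]): A returns [-6], B raises IndexError
import Mathlib
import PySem

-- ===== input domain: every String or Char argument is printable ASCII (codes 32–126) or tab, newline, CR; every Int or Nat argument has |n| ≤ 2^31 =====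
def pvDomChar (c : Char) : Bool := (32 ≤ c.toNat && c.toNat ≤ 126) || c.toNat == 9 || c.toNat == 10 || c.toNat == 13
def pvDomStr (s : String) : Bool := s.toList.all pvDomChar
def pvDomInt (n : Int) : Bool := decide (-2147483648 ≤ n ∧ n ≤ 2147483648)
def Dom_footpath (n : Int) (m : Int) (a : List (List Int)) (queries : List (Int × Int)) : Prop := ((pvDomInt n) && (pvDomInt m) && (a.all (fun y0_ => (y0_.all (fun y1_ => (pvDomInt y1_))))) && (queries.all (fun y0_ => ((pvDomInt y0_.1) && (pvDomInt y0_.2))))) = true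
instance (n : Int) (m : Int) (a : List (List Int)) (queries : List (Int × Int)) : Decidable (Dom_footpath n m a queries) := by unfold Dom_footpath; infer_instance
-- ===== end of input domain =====

-- B replaces A's four corner DP tables by a per-query direct minimum scan of each corner
-- rectangle: a genuinely different (table-free) algorithm, not faster, proved to return the
-- same list on every in-range input.


-- ===== PORT A =====
-- A's four n×m Python arrays are modeled as total functions Int → Int → Int initialised to 0
-- (the [[0]*m for _ in range(n)] fill); the Python reads and writes each table only at the
-- same in-range cells the port does, so the table contents coincide; reads Python would
-- raise on (out-of-range queries) are excluded by Pre_footpath.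

-- a[i][j]; exact wherever the Python access succeeds (Pre_ keeps all indices in range)
def pvGetA (a : List (List Int)) (i j : Int) : Int :=
  PySem.List.pyGetD (PySem.List.pyGetD a i []) j 0

-- table[i][j] = v  (array assignment as function update)
def pvUpd2 (t : Int → Int → Int) (i j v : Int) : Int → Int → Int :=
  fun i' j' => if i' = i ∧ j' = j then v else t i' j'

-- the body of each of A's four double loops, in A's order of the two `if min` steps
def pvTLCell (a : List (List Int)) (t : Int → Int → Int) (i j : Int) : Int :=
  let v := pvGetA a i j
  let v := if 0 < i then min v (t (i-1) j) else v
  if 0 < j then min v (t i (j-1)) else v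

def pvTRCell (a : List (List Int)) (m : Int) (t : Int → Int → Int) (i j : Int) : Int :=
  let v := pvGetA a i j
  let v := if 0 < i then min v (t (i-1) j) else v
  if j < m - 1 then min v (t i (j+1)) else v

def pvBLCell (a : List (List Int)) (n : Int) (t : Int → Int → Int) (i j : Int) : Int :=
  let v := pvGetA a i j
  let v := if i < n - 1 then min v (t (i+1) j) else v
  if 0 < j then min v (t i (j-1)) else v

def pvBRCell (a : List (List Int)) (n m : Int) (t : Int → Int → Int) (i j : Int) : Int :=
  let v := pvGetA a i j
  let v := if i < n - 1 then min v (t (i+1) j) else v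
  if j < m - 1 then min v (t i (j+1)) else v

def pvTLRow (a : List (List Int)) (m : Int) (t : Int → Int → Int) (i : Int) : Int → Int → Int :=
  (PySem.List.pyRange 0 m 1).foldl (fun t j => pvUpd2 t i j (pvTLCell a t i j)) t

def pvTRRow (a : List (List Int)) (m : Int) (t : Int → Int → Int) (i : Int) : Int → Int → Int :=
  (PySem.List.pyRange (m-1) (-1) (-1)).foldl (fun t j => pvUpd2 t i j (pvTRCell a m t i j)) t

def pvBLRow (a : List (List Int)) (n m : Int) (t : Int → Int → Int) (i : Int) : Int → Int → Int :=
  (PySem.List.pyRange 0 m 1).foldl (fun t j => pvUpd2 t i j (pvBLCell a n t i j)) t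

def pvBRRow (a : List (List Int)) (n m : Int) (t : Int → Int → Int) (i : Int) : Int → Int → Int :=
  (PySem.List.pyRange (m-1) (-1) (-1)).foldl (fun t j => pvUpd2 t i j (pvBRCell a n m t i j)) t

def pvTL (n m : Int) (a : List (List Int)) : Int → Int → Int :=
  (PySem.List.pyRange 0 n 1).foldl (fun t i => pvTLRow a m t i) (fun _ _ => 0)

def pvTR (n m : Int) (a : List (List Int)) : Int → Int → Int :=
  (PySem.List.pyRange 0 n 1).foldl (fun t i => pvTRRow a m t i) (fun _ _ => 0)

def pvBL (n m : Int) (a : List (List Int)) : Int → Int → Int :=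
  (PySem.List.pyRange (n-1) (-1) (-1)).foldl (fun t i => pvBLRow a n m t i) (fun _ _ => 0)

def pvBR (n m : Int) (a : List (List Int)) : Int → Int → Int :=
  (PySem.List.pyRange (n-1) (-1) (-1)).foldl (fun t i => pvBRRow a n m t i) (fun _ _ => 0)

def footpath (n : Int) (m : Int) (a : List (List Int)) (queries : List (Int × Int)) : List Int :=
  let topl := pvTL n m a
  let topr := pvTR n m a
  let bottoml := pvBL n m a
  let bottomr := pvBR n m a
  queries.foldl (fun result rc =>
    let r := rc.1 - 1
    let c := rc.2 - 1
    let tl := if 0 < r ∧ 0 < c then topl (r-1) (c-1) else 0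
    let tr := if 0 < r ∧ c < m - 1 then topr (r-1) (c+1) else 0
    let bl := if r < n - 1 ∧ 0 < c then bottoml (r+1) (c-1) else 0
    let br := if r < n - 1 ∧ c < m - 1 then bottomr (r+1) (c+1) else 0
    result ++ [tl + tr + bl + br]) []

-- ===== PORT B =====
-- the generator  a[i][j] for i in range(i0, i1) for j in range(j0, j1)
def pvRectL (a : List (List Int)) (i0 i1 j0 j1 : Int) : List Int :=
  (PySem.List.pyRange i0 i1 1).flatMap
    (fun i => (PySem.List.pyRange j0 j1 1).map (fun j => pvGetA a i j))

-- min(...) over that generator; Python's min raises on an empty generator, but B only calls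
-- rmin on nonempty rectangles, so the .getD 0 default is never the returned value
def pvRMin (a : List (List Int)) (i0 i1 j0 j1 : Int) : Int :=
  (PySem.List.min? (pvRectL a i0 i1 j0 j1) (fun x => x)).getD 0

def footpath_alt (n : Int) (m : Int) (a : List (List Int)) (queries : List (Int × Int)) : List Int :=
  queries.foldl (fun result rc =>
    let r := rc.1 - 1
    let c := rc.2 - 1
    let tl := if 0 < r ∧ 0 < c then pvRMin a 0 r 0 c else 0
    let tr := if 0 < r ∧ c < m - 1 then pvRMin a 0 r (c+1) m else 0
    let bl := if r < n - 1 ∧ 0 < c then pvRMin a (r+1) n 0 c else 0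
    let br := if r < n - 1 ∧ c < m - 1 then pvRMin a (r+1) n (c+1) m else 0
    result ++ [tl + tr + bl + br]) []

-- ===== PRECONDITION & SPEC =====
-- Pre_ holds exactly when every subscript A executes is a genuine in-range, non-negative
-- index: the n×m grid is really present in a (whenever the build loops run at all) and each
-- query only triggers table reads inside the table. Outside Pre_ the Python A either raises
-- IndexError or returns an accidental value through negative-index wraparound, which B's
-- direct rectangle scan does not reproduce (see the cited examples).
def Pre_footpath (n : Int) (m : Int) (a : List (List Int)) (queries : List (Int × Int)) : Prop :=
  (0 < n → 0 < m → n ≤ (a.length : Int) ∧ ∀ row ∈ a.take n.toNat, m ≤ (row.length : Int)) ∧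
  ∀ q ∈ queries,
    (0 < q.1 - 1 ∧ 0 < q.2 - 1 → q.1 - 1 ≤ n ∧ q.2 - 1 ≤ m) ∧
    (0 < q.1 - 1 ∧ q.2 - 1 < m - 1 → q.1 - 1 ≤ n ∧ -1 ≤ q.2 - 1) ∧
    (q.1 - 1 < n - 1 ∧ 0 < q.2 - 1 → -1 ≤ q.1 - 1 ∧ q.2 - 1 ≤ m) ∧
    (q.1 - 1 < n - 1 ∧ q.2 - 1 < m - 1 → -1 ≤ q.1 - 1 ∧ -1 ≤ q.2 - 1)

instance (n : Int) (m : Int) (a : List (List Int)) (queries : List (Int × Int)) : Decidable (Pre_footpath n m a queries) := by unfold Pre_footpath; infer_instance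

def pvWitness_footpath : Int × Int × List (List Int) × (List (Int × Int)) :=
  (2, 2, [[1, 2], [3, 4]], [(1, 1), (2, 2)])

def Spec_footpath (n : Int) (m : Int) (a : List (List Int)) (queries : List (Int × Int)) (out : List Int) : Prop := out = footpath_alt n m a queries
instance (n : Int) (m : Int) (a : List (List Int)) (queries : List (Int × Int)) (out : List Int) : Decidable (Spec_footpath n m a queries out) := by unfold Spec_footpath; infer_instance

-- ===== CLAIM (what is proved, stated in full; the proofs are below) =====
def Claim_equal_footpath : Prop := ∀ (n : Int) (m : Int) (a : List (List Int)) (queries : List (Int × Int)), Dom_footpath n m a queries → Pre_footpath n m a queries → Spec_footpath n m a queries (footpath n m a queries)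

-- ===== LEMMAS AND PROOFS =====

-- v is the minimum of the list l (membership + lower bound); for Int this pins min(l) exactly
def IsMinOf (v : Int) (l : List Int) : Prop := v ∈ l ∧ ∀ x ∈ l, v ≤ x

lemma pvRMin_eq {a : List (List Int)} {i0 i1 j0 j1 v : Int}
    (h : IsMinOf v (pvRectL a i0 i1 j0 j1)) : pvRMin a i0 i1 j0 j1 = v := by
  cases hmin : PySem.List.min? (pvRectL a i0 i1 j0 j1) (fun x => x) with
  | none =>
      rw [PySem.List.min?_eq_none_iff] at hmin
      rw [hmin] at h
      exact absurd h.1 (List.not_mem_nil)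
  | some w =>
      unfold pvRMin
      rw [hmin]
      exact le_antisymm (PySem.List.min?_isMin hmin v h.1) (h.2 w (PySem.List.min?_mem hmin))

lemma mem_pvRectL {a : List (List Int)} {i0 i1 j0 j1 x : Int} :
    x ∈ pvRectL a i0 i1 j0 j1 ↔
      ∃ i j, i0 ≤ i ∧ i < i1 ∧ j0 ≤ j ∧ j < j1 ∧ x = pvGetA a i j := by
  simp only [pvRectL, List.mem_flatMap, List.mem_map, PySem.List.mem_pyRange_one]
  constructor
  · rintro ⟨i, ⟨hi1, hi2⟩, j, ⟨hj1, hj2⟩, rfl⟩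
    exact ⟨i, j, hi1, hi2, hj1, hj2, rfl⟩
  · rintro ⟨i, j, hi1, hi2, hj1, hj2, rfl⟩
    exact ⟨i, ⟨hi1, hi2⟩, j, ⟨hj1, hj2⟩, rfl⟩

lemma isMin_cell (a : List (List Int)) (i j : Int) :
    IsMinOf (pvGetA a i j) (pvRectL a i (i+1) j (j+1)) := by
  constructor
  · exact mem_pvRectL.mpr ⟨i, j, le_refl i, by omega, le_refl j, by omega, rfl⟩
  · intro x hx
    rcases mem_pvRectL.mp hx with ⟨i', j', h1, h2, h3, h4, rfl⟩
    have : i' = i ∧ j' = j := by omega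
    rw [this.1, this.2]

-- the shape of each cell update: start at a[i][j], min with up to two neighbour minima
lemma isMin_union {v1 v2 : Int} {l1 l2 : List Int}
    (h1 : IsMinOf v1 l1) (h2 : IsMinOf v2 l2) : IsMinOf (min v1 v2) (l1 ++ l2) := by
  constructor
  · rcases le_total v1 v2 with hle | hle
    · rw [min_eq_left hle]; exact List.mem_append_left _ h1.1
    · rw [min_eq_right hle]; exact List.mem_append_right _ h2.1
  · intro x hx
    rcases List.mem_append.mp hx with hx | hx
    · exact le_trans (min_le_left _ _) (h1.2 x hx)
    · exact le_trans (min_le_right _ _) (h2.2 x hx)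

lemma isMin_congr {v : Int} {l1 l2 : List Int}
    (h : IsMinOf v l1) (hmem : ∀ x, x ∈ l2 ↔ x ∈ l1) : IsMinOf v l2 :=
  ⟨(hmem v).mpr h.1, fun x hx => h.2 x ((hmem x).mp hx)⟩

lemma isMin_step {g m1 m2 : Int} {c1 c2 : Prop} [Decidable c1] [Decidable c2]
    {lg l1 l2 big : List Int}
    (hg : IsMinOf g lg) (h1 : c1 → IsMinOf m1 l1) (h2 : c2 → IsMinOf m2 l2)
    (hmem : ∀ x, x ∈ big ↔ x ∈ lg ∨ (c1 ∧ x ∈ l1) ∨ (c2 ∧ x ∈ l2)) :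
    IsMinOf (if c2 then min (if c1 then min g m1 else g) m2 else (if c1 then min g m1 else g)) big := by
  by_cases hc1 : c1 <;> by_cases hc2 : c2 <;>
    simp only [hc1, hc2, if_true, if_false]
  · exact isMin_congr (isMin_union (isMin_union hg (h1 hc1)) (h2 hc2))
      (fun x => by simp only [hmem x, List.mem_append, hc1, hc2, true_and]; tauto)
  · exact isMin_congr (isMin_union hg (h1 hc1))
      (fun x => by simp only [hmem x, List.mem_append, hc1, hc2, true_and, false_and]; tauto)
  · exact isMin_congr (isMin_union hg (h2 hc2))
      (fun x => by simp only [hmem x, List.mem_append, hc1, hc2, true_and, false_and]; tauto)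
  · exact isMin_congr hg
      (fun x => by simp only [hmem x, hc1, hc2, false_and]; tauto)

-- generic invariant for an ascending fold 'for x in range(b)' that fills slot x at step x
lemma fold_slots_asc (b : Int) (step : (Int → Int → Int) → Int → (Int → Int → Int))
    (G : Int → (Int → Int → Int) → Prop) (I : (Int → Int → Int) → Prop) (t0 : Int → Int → Int)
    (hI0 : I t0)
    (hI : ∀ t x, 0 ≤ x → x < b → I t → I (step t x))
    (hpres : ∀ t x y, 0 ≤ x → x < b → 0 ≤ y → y < b → y ≠ x → G y t → G y (step t x))
    (hstep : ∀ t x, 0 ≤ x → x < b → I t → (∀ y, 0 ≤ y → y < x → G y t) → G x (step t x)) :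
    ∀ x, 0 ≤ x → x < b → G x ((PySem.List.pyRange 0 b 1).foldl step t0) := by
  have key : ∀ k : Nat, (k : Int) ≤ b →
      I ((PySem.List.pyRange 0 (k : Int) 1).foldl step t0) ∧
      (∀ y, 0 ≤ y → y < (k : Int) → G y ((PySem.List.pyRange 0 (k : Int) 1).foldl step t0)) := by
    intro k
    induction k with
    | zero => intro _; simpa [PySem.List.pyRange_one_eq_nil] using ⟨hI0, by omega⟩
    | succ k ih =>
        intro hk
        have hk' : (k : Int) ≤ b := by push_cast at hk ⊢; omega
        have hkb : (k : Int) < b := by push_cast at hk ⊢; omega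
        rcases ih hk' with ⟨hIt, hGt⟩
        have hrange : PySem.List.pyRange 0 ((k : Nat) + 1 : Int) 1
            = PySem.List.pyRange 0 (k : Int) 1 ++ [(k : Int)] :=
          PySem.List.pyRange_one_succ_right (by omega)
        have hcast : (((k + 1 : Nat)) : Int) = (k : Int) + 1 := by push_cast; ring
        rw [hcast, hrange, List.foldl_append]
        refine ⟨hI _ _ (by omega) hkb hIt, ?_⟩
        intro y hy0 hy
        by_cases hyk : y = (k : Int)
        · subst hyk
          exact hstep _ _ hy0 hkb hIt hGt
        · have : y < (k : Int) := by omega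
          exact hpres _ _ _ (by omega) hkb hy0 (by omega) hyk (hGt y hy0 this)
  intro x hx0 hxb
  have hb0 : 0 ≤ b := by omega
  have := (key b.toNat (by omega)).2 x hx0 (by omega)
  rwa [Int.toNat_of_nonneg hb0] at this
  
-- the descending twin: 'for x in range(b-1, -1, -1)', slot x needs the slots above it
lemma fold_slots_desc (b : Int) (step : (Int → Int → Int) → Int → (Int → Int → Int))
    (G : Int → (Int → Int → Int) → Prop) (I : (Int → Int → Int) → Prop) (t0 : Int → Int → Int)
    (hI0 : I t0)
    (hI : ∀ t x, 0 ≤ x → x < b → I t → I (step t x))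
    (hpres : ∀ t x y, 0 ≤ x → x < b → 0 ≤ y → y < b → y ≠ x → G y t → G y (step t x))
    (hstep : ∀ t x, 0 ≤ x → x < b → I t → (∀ y, x < y → y < b → G y t) → G x (step t x)) :
    ∀ x, 0 ≤ x → x < b → G x ((PySem.List.pyRange (b-1) (-1) (-1)).foldl step t0) := by
  have key : ∀ k : Nat, (k : Int) ≤ b → ∀ t, I t →
      (∀ y, (k : Int) ≤ y → y < b → G y t) →
      (∀ y, 0 ≤ y → y < b → G y ((PySem.List.pyRange ((k : Int) - 1) (-1) (-1)).foldl step t)) := by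
    intro k
    induction k with
    | zero =>
        intro _ t _ hGt y hy0 hyb
        rw [show ((0 : Nat) : Int) - 1 = -1 by norm_num,
          PySem.List.pyRange_neg_one_eq_nil (by omega)]
        exact hGt y (by omega) hyb
    | succ k ih =>
        intro hk t hIt hGt y hy0 hyb
        have hk' : (k : Int) ≤ b := by push_cast at hk ⊢; omega
        have hkb : (k : Int) < b := by push_cast at hk ⊢; omega
        have hcast : (((k + 1 : Nat)) : Int) - 1 = (k : Int) := by push_cast; ring
        rw [hcast, PySem.List.pyRange_neg_one_cons (by omega), List.foldl_cons]
        apply ih hk' _ (hI _ _ (by omega) hkb hIt)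
        · intro y' hy1 hy2
          by_cases hyk : y' = (k : Int)
          · subst hyk
            exact hstep _ _ (by omega) hkb hIt (fun z hz1 hz2 => hGt z (by omega) hz2)
          · exact hpres _ _ _ (by omega) hkb (by omega) hy2 hyk (hGt y' (by omega) hy2)
        · exact hy0
        · exact hyb
  intro x hx0 hxb
  have hb0 : 0 ≤ b := by omega
  have := key b.toNat (by omega) t0 hI0 (by intro y h1 h2; rw [Int.toNat_of_nonneg hb0] at h1; omega)
  rw [Int.toNat_of_nonneg hb0] at this
  exact this x hx0 hxb

-- a row fold writes only row i
lemma row_untouched (C : (Int → Int → Int) → Int → Int) (L : List Int) (i : Int)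
    (t : Int → Int → Int) (i' j' : Int) (h : i' ≠ i) :
    (L.foldl (fun t j => pvUpd2 t i j (C t j)) t) i' j' = t i' j' := by
  induction L generalizing t with
  | nil => rfl
  | cons x xs ih => simp only [List.foldl_cons]; rw [ih]; simp [pvUpd2, h]

-- the four rectangles each table entry is the minimum of
def pvRTL (a : List (List Int)) (i j : Int) : List Int := pvRectL a 0 (i+1) 0 (j+1)
def pvRTR (a : List (List Int)) (m i j : Int) : List Int := pvRectL a 0 (i+1) j m
def pvRBL (a : List (List Int)) (n i j : Int) : List Int := pvRectL a i n 0 (j+1)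
def pvRBR (a : List (List Int)) (n m i j : Int) : List Int := pvRectL a i n j m

lemma tl_correct (n m : Int) (a : List (List Int)) :
    ∀ i j, 0 ≤ i → i < n → 0 ≤ j → j < m → IsMinOf (pvTL n m a i j) (pvRTL a i j) := by
  intro i j hi0 hin hj0 hjm
  have main := fold_slots_asc n (fun t i => pvTLRow a m t i)
    (fun i t => ∀ j, 0 ≤ j → j < m → IsMinOf (t i j) (pvRTL a i j)) (fun _ => True) (fun _ _ => 0)
    trivial (fun _ _ _ _ _ => trivial)
    ?_ ?_ i hi0 hin
  · exact main j hj0 hjm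
  · -- a row fold leaves other rows alone
    intro t x y _ _ _ _ hyx hG j hj0 hjm
    simp only [pvTLRow]
    rw [row_untouched _ _ _ _ _ _ hyx]
    exact hG j hj0 hjm
  · -- one row, via the generic ascending slot fold on columns
    intro t x hx0 hxn _ hprev j hj0 hjm
    have inner := fold_slots_asc m (fun t j => pvUpd2 t x j (pvTLCell a t x j))
      (fun j t => IsMinOf (t x j) (pvRTL a x j))
      (fun t' => ∀ i' j', i' ≠ x → t' i' j' = t i' j') t
      (fun _ _ _ => rfl) ?_ ?_ ?_ j hj0 hjm
    · exact inner
    · intro t' y _ _ hIt i' j' hne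
      simp only [pvUpd2]
      rw [if_neg (by tauto)]
      exact hIt i' j' hne
    · intro t' x' y' _ _ _ _ hne hG
      simp only [pvUpd2]
      rw [if_neg (by tauto)]
      exact hG
    · intro t' y hy0 hym hIt hGcols
      beta_reduce
      rw [show pvUpd2 t' x y (pvTLCell a t' x y) x y = pvTLCell a t' x y from by simp [pvUpd2]]
      simp only [pvTLCell]
      apply isMin_step (isMin_cell a x y)
        (fun h => by rw [hIt (x-1) y (by omega)]; exact hprev (x-1) (by omega) (by omega) y hy0 hym)
        (fun h => hGcols (y-1) (by omega) (by omega))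
      intro z
      unfold pvRTL
      simp only [mem_pvRectL]
      constructor
      · rintro ⟨i', j', h1, h2, h3, h4, rfl⟩
        by_cases hlt : i' < x
        · exact Or.inr (Or.inl ⟨by omega, i', j', by omega, by omega, by omega, by omega, rfl⟩)
        · by_cases hj : j' < y
          · exact Or.inr (Or.inr ⟨by omega, i', j', by omega, by omega, by omega, by omega, rfl⟩)
          · have : i' = x ∧ j' = y := by omega
            exact Or.inl ⟨i', j', by omega, by omega, by omega, by omega, rfl⟩
      · rintro (⟨i', j', h1, h2, h3, h4, rfl⟩ | ⟨hc, i', j', h1, h2, h3, h4, rfl⟩ |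
            ⟨hc, i', j', h1, h2, h3, h4, rfl⟩) <;>
          exact ⟨i', j', by omega, by omega, by omega, by omega, rfl⟩

lemma tr_correct (n m : Int) (a : List (List Int)) :
    ∀ i j, 0 ≤ i → i < n → 0 ≤ j → j < m → IsMinOf (pvTR n m a i j) (pvRTR a m i j) := by
  intro i j hi0 hin hj0 hjm
  have main := fold_slots_asc n (fun t i => pvTRRow a m t i)
    (fun i t => ∀ j, 0 ≤ j → j < m → IsMinOf (t i j) (pvRTR a m i j)) (fun _ => True) (fun _ _ => 0)
    trivial (fun _ _ _ _ _ => trivial)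
    ?_ ?_ i hi0 hin
  · exact main j hj0 hjm
  · intro t x y _ _ _ _ hyx hG j hj0 hjm
    simp only [pvTRRow]
    rw [row_untouched _ _ _ _ _ _ hyx]
    exact hG j hj0 hjm
  · intro t x hx0 hxn _ hprev j hj0 hjm
    have inner := fold_slots_desc m (fun t j => pvUpd2 t x j (pvTRCell a m t x j))
      (fun j t => IsMinOf (t x j) (pvRTR a m x j))
      (fun t' => ∀ i' j', i' ≠ x → t' i' j' = t i' j') t
      (fun _ _ _ => rfl) ?_ ?_ ?_ j hj0 hjm
    · exact inner
    · intro t' y _ _ hIt i' j' hne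
      simp only [pvUpd2]
      rw [if_neg (by tauto)]
      exact hIt i' j' hne
    · intro t' x' y' _ _ _ _ hne hG
      simp only [pvUpd2]
      rw [if_neg (by tauto)]
      exact hG
    · intro t' y hy0 hym hIt hGcols
      beta_reduce
      rw [show pvUpd2 t' x y (pvTRCell a m t' x y) x y = pvTRCell a m t' x y from by simp [pvUpd2]]
      simp only [pvTRCell]
      apply isMin_step (isMin_cell a x y)
        (fun h => by rw [hIt (x-1) y (by omega)]; exact hprev (x-1) (by omega) (by omega) y hy0 hym)
        (fun h => hGcols (y+1) (by omega) (by omega))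
      intro z
      unfold pvRTR
      simp only [mem_pvRectL]
      constructor
      · rintro ⟨i', j', h1, h2, h3, h4, rfl⟩
        by_cases hlt : i' < x
        · exact Or.inr (Or.inl ⟨by omega, i', j', by omega, by omega, by omega, by omega, rfl⟩)
        · by_cases hj : y < j'
          · exact Or.inr (Or.inr ⟨by omega, i', j', by omega, by omega, by omega, by omega, rfl⟩)
          · have : i' = x ∧ j' = y := by omega
            exact Or.inl ⟨i', j', by omega, by omega, by omega, by omega, rfl⟩
      · rintro (⟨i', j', h1, h2, h3, h4, rfl⟩ | ⟨hc, i', j', h1, h2, h3, h4, rfl⟩ |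
            ⟨hc, i', j', h1, h2, h3, h4, rfl⟩) <;>
          exact ⟨i', j', by omega, by omega, by omega, by omega, rfl⟩

lemma bl_correct (n m : Int) (a : List (List Int)) :
    ∀ i j, 0 ≤ i → i < n → 0 ≤ j → j < m → IsMinOf (pvBL n m a i j) (pvRBL a n i j) := by
  intro i j hi0 hin hj0 hjm
  have main := fold_slots_desc n (fun t i => pvBLRow a n m t i)
    (fun i t => ∀ j, 0 ≤ j → j < m → IsMinOf (t i j) (pvRBL a n i j)) (fun _ => True) (fun _ _ => 0)
    trivial (fun _ _ _ _ _ => trivial)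
    ?_ ?_ i hi0 hin
  · exact main j hj0 hjm
  · intro t x y _ _ _ _ hyx hG j hj0 hjm
    simp only [pvBLRow]
    rw [row_untouched _ _ _ _ _ _ hyx]
    exact hG j hj0 hjm
  · intro t x hx0 hxn _ hprev j hj0 hjm
    have inner := fold_slots_asc m (fun t j => pvUpd2 t x j (pvBLCell a n t x j))
      (fun j t => IsMinOf (t x j) (pvRBL a n x j))
      (fun t' => ∀ i' j', i' ≠ x → t' i' j' = t i' j') t
      (fun _ _ _ => rfl) ?_ ?_ ?_ j hj0 hjm
    · exact inner
    · intro t' y _ _ hIt i' j' hne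
      simp only [pvUpd2]
      rw [if_neg (by tauto)]
      exact hIt i' j' hne
    · intro t' x' y' _ _ _ _ hne hG
      simp only [pvUpd2]
      rw [if_neg (by tauto)]
      exact hG
    · intro t' y hy0 hym hIt hGcols
      beta_reduce
      rw [show pvUpd2 t' x y (pvBLCell a n t' x y) x y = pvBLCell a n t' x y from by simp [pvUpd2]]
      simp only [pvBLCell]
      apply isMin_step (isMin_cell a x y)
        (fun h => by rw [hIt (x+1) y (by omega)]; exact hprev (x+1) (by omega) (by omega) y hy0 hym)
        (fun h => hGcols (y-1) (by omega) (by omega))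
      intro z
      unfold pvRBL
      simp only [mem_pvRectL]
      constructor
      · rintro ⟨i', j', h1, h2, h3, h4, rfl⟩
        by_cases hlt : x < i'
        · exact Or.inr (Or.inl ⟨by omega, i', j', by omega, by omega, by omega, by omega, rfl⟩)
        · by_cases hj : j' < y
          · exact Or.inr (Or.inr ⟨by omega, i', j', by omega, by omega, by omega, by omega, rfl⟩)
          · have : i' = x ∧ j' = y := by omega
            exact Or.inl ⟨i', j', by omega, by omega, by omega, by omega, rfl⟩
      · rintro (⟨i', j', h1, h2, h3, h4, rfl⟩ | ⟨hc, i', j', h1, h2, h3, h4, rfl⟩ |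
            ⟨hc, i', j', h1, h2, h3, h4, rfl⟩) <;>
          exact ⟨i', j', by omega, by omega, by omega, by omega, rfl⟩

lemma br_correct (n m : Int) (a : List (List Int)) :
    ∀ i j, 0 ≤ i → i < n → 0 ≤ j → j < m → IsMinOf (pvBR n m a i j) (pvRBR a n m i j) := by
  intro i j hi0 hin hj0 hjm
  have main := fold_slots_desc n (fun t i => pvBRRow a n m t i)
    (fun i t => ∀ j, 0 ≤ j → j < m → IsMinOf (t i j) (pvRBR a n m i j)) (fun _ => True) (fun _ _ => 0)
    trivial (fun _ _ _ _ _ => trivial)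
    ?_ ?_ i hi0 hin
  · exact main j hj0 hjm
  · intro t x y _ _ _ _ hyx hG j hj0 hjm
    simp only [pvBRRow]
    rw [row_untouched _ _ _ _ _ _ hyx]
    exact hG j hj0 hjm
  · intro t x hx0 hxn _ hprev j hj0 hjm
    have inner := fold_slots_desc m (fun t j => pvUpd2 t x j (pvBRCell a n m t x j))
      (fun j t => IsMinOf (t x j) (pvRBR a n m x j))
      (fun t' => ∀ i' j', i' ≠ x → t' i' j' = t i' j') t
      (fun _ _ _ => rfl) ?_ ?_ ?_ j hj0 hjm
    · exact inner
    · intro t' y _ _ hIt i' j' hne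
      simp only [pvUpd2]
      rw [if_neg (by tauto)]
      exact hIt i' j' hne
    · intro t' x' y' _ _ _ _ hne hG
      simp only [pvUpd2]
      rw [if_neg (by tauto)]
      exact hG
    · intro t' y hy0 hym hIt hGcols
      beta_reduce
      rw [show pvUpd2 t' x y (pvBRCell a n m t' x y) x y = pvBRCell a n m t' x y from by simp [pvUpd2]]
      simp only [pvBRCell]
      apply isMin_step (isMin_cell a x y)
        (fun h => by rw [hIt (x+1) y (by omega)]; exact hprev (x+1) (by omega) (by omega) y hy0 hym)
        (fun h => hGcols (y+1) (by omega) (by omega))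
      intro z
      unfold pvRBR
      simp only [mem_pvRectL]
      constructor
      · rintro ⟨i', j', h1, h2, h3, h4, rfl⟩
        by_cases hlt : x < i'
        · exact Or.inr (Or.inl ⟨by omega, i', j', by omega, by omega, by omega, by omega, rfl⟩)
        · by_cases hj : y < j'
          · exact Or.inr (Or.inr ⟨by omega, i', j', by omega, by omega, by omega, by omega, rfl⟩)
          · have : i' = x ∧ j' = y := by omega
            exact Or.inl ⟨i', j', by omega, by omega, by omega, by omega, rfl⟩
      · rintro (⟨i', j', h1, h2, h3, h4, rfl⟩ | ⟨hc, i', j', h1, h2, h3, h4, rfl⟩ |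
            ⟨hc, i', j', h1, h2, h3, h4, rfl⟩) <;>
          exact ⟨i', j', by omega, by omega, by omega, by omega, rfl⟩

-- ===== VERDICT (by name: the statement is the Claim_ definition above) =====
theorem footpath_spec : Claim_equal_footpath := by
  intro n m a queries _ hpre
  unfold Spec_footpath footpath footpath_alt
  simp only [PySem.List.foldl_append_singleton_eq_map, List.nil_append]
  apply List.map_congr_left
  intro q hq
  rcases hpre with ⟨_, hqs⟩
  rcases hqs q hq with ⟨hQ1, hQ2, hQ3, hQ4⟩
  congr 1
  · congr 1
    · congr 1
      · -- tl
        by_cases h : 0 < q.1 - 1 ∧ 0 < q.2 - 1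
        · rw [if_pos h, if_pos h]
          have hb := hQ1 h
          have := tl_correct n m a (q.1 - 1 - 1) (q.2 - 1 - 1) (by omega) (by omega) (by omega) (by omega)
          unfold pvRTL at this
          rw [show q.1 - 1 - 1 + 1 = q.1 - 1 by ring, show q.2 - 1 - 1 + 1 = q.2 - 1 by ring] at this
          exact (pvRMin_eq this).symm
        · rw [if_neg h, if_neg h]
      · -- tr
        by_cases h : 0 < q.1 - 1 ∧ q.2 - 1 < m - 1
        · rw [if_pos h, if_pos h]
          have hb := hQ2 h
          have := tr_correct n m a (q.1 - 1 - 1) (q.2 - 1 + 1) (by omega) (by omega) (by omega) (by omega)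
          unfold pvRTR at this
          rw [show q.1 - 1 - 1 + 1 = q.1 - 1 by ring] at this
          exact (pvRMin_eq this).symm
        · rw [if_neg h, if_neg h]
    · -- bl
      by_cases h : q.1 - 1 < n - 1 ∧ 0 < q.2 - 1
      · rw [if_pos h, if_pos h]
        have hb := hQ3 h
        have := bl_correct n m a (q.1 - 1 + 1) (q.2 - 1 - 1) (by omega) (by omega) (by omega) (by omega)
        unfold pvRBL at this
        rw [show q.2 - 1 - 1 + 1 = q.2 - 1 by ring] at this
        exact (pvRMin_eq this).symm
      · rw [if_neg h, if_neg h]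
  · -- br
    by_cases h : q.1 - 1 < n - 1 ∧ q.2 - 1 < m - 1
    · rw [if_pos h, if_pos h]
      have hb := hQ4 h
      have := br_correct n m a (q.1 - 1 + 1) (q.2 - 1 + 1) (by omega) (by omega) (by omega) (by omega)
      unfold pvRBR at this
      exact (pvRMin_eq this).symm
    · rw [if_neg h, if_neg h]
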